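-- pv_equiv track=rewrite | github.com/hwisaac/md_to_epub | txt_to_epub.py | create_chapter_html
-- ===== SOURCE A (Python) =====
-- def create_chapter_html(title, content):
--     """
--     챕터 내용을 HTML로 변환합니다.
--     """
--     html = '<?xml version="1.0" encoding="utf-8"?>\n'
--     html += "<!DOCTYPE html>\n"
--     html += '<html xmlns="http://www.w3.org/1999/xhtml" xmlns:epub="http://www.idpf.org/2007/ops">\n'
--     html += "<head>\n"
--     html += f'  <title>{title if title else "Chapter"}</title>\n'
--     html += '  <meta charset="utf-8" />\n'
--     html += "</head>\n"
--     html += "<body>\n"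
--
--     if title:
--         html += f"  <h1>{title}</h1>\n"
--
--     current_paragraph = []
--
--     for line in content:
--         if not line:
--             if current_paragraph:
--                 paragraph_text = " ".join(current_paragraph)
--                 html += f"  <p>{paragraph_text}</p>\n"
--                 current_paragraph = []
--             continue
--
--         # 짧은 줄은 소제목으로 처리 (20자 미만)
--         if len(line) < 20 and not line.startswith(" "):
--             # 이전 문단이 있으면 먼저 처리
--             if current_paragraph:
--                 paragraph_text = " ".join(current_paragraph)
--                 html += f"  <p>{paragraph_text}</p>\n"
--                 current_paragraph = []
--
--             html += f"  <h2>{line}</h2>\n"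
--         else:
--             current_paragraph.append(line)
--
--     # 마지막 문단 처리
--     if current_paragraph:
--         paragraph_text = " ".join(current_paragraph)
--         html += f"  <p>{paragraph_text}</p>\n"
--
--     html += "</body>\n"
--     html += "</html>"
--
--     return html
-- ===== SOURCE B (Python) =====
-- def create_chapter_html(title, content):
--     # Two-phase: group lines into (tag, text) elements by index scanning, then render once.
--     def is_heading(line):
--         return len(line) < 20 and not line.startswith(" ")
--
--     elements = []
--     i, n = 0, len(content)
--     while i < n:
--         line = content[i]
--         if not line:
--             i += 1
--         elif is_heading(line):
--             elements.append(("h2", line))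
--             i += 1
--         else:
--             j = i + 1
--             while j < n and content[j] and not is_heading(content[j]):
--                 j += 1
--             elements.append(("p", " ".join(content[i:j])))
--             i = j
--
--     parts = [
--         '<?xml version="1.0" encoding="utf-8"?>\n',
--         "<!DOCTYPE html>\n",
--         '<html xmlns="http://www.w3.org/1999/xhtml" xmlns:epub="http://www.idpf.org/2007/ops">\n',
--         "<head>\n",
--         "  <title>%s</title>\n" % (title if title else "Chapter"),
--         '  <meta charset="utf-8" />\n',
--         "</head>\n",
--         "<body>\n",
--     ]
--     if title:
--         parts.append("  <h1>%s</h1>\n" % title)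
--     parts.extend("  <%s>%s</%s>\n" % (tag, text, tag) for tag, text in elements)
--     parts.append("</body>\n")
--     parts.append("</html>")
--     return "".join(parts)
-- ===== Notes on version B (the rewrite author's own statement) =====
-- stated objective: alternative
-- what changed: B replaces A's single pass with a mutable (html, pending-paragraph) accumulator by two phases: an index scan that groups consecutive paragraph lines into a list of ('h2'|'p', text) elements, then a single render/join of the fixed boilerplate, the optional h1 and the element list.
import Mathlib
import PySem

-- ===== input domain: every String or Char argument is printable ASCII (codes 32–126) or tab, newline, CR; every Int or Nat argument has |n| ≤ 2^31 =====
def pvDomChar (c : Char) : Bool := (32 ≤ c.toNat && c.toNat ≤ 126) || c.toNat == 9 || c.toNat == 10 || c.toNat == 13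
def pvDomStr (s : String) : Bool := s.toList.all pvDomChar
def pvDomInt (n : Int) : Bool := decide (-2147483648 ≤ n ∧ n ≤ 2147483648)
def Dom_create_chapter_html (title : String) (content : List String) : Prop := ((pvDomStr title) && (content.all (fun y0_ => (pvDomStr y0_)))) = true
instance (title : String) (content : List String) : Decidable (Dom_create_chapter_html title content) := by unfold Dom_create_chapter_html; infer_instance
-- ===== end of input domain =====

-- B groups lines into ('h2'|'p', text) elements first and renders them in a second phase; A interleaves HTML emission with the parse. Same output, different decomposition.

-- ===== PORT A =====
-- A's loop: state is (html so far, pending paragraph lines)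
def pvALoop : List String → String → List String → String × List String
  | [], html, para => (html, para)
  | line :: rest, html, para =>
    if line = "" then
      if para ≠ [] then
        pvALoop rest (html ++ "  <p>" ++ PySem.Str.join " " para ++ "</p>\n") []
      else
        pvALoop rest html para
    else if decide (PySem.Str.len line < 20) && !PySem.Str.startswith line " " then
      let html := if para ≠ [] then html ++ "  <p>" ++ PySem.Str.join " " para ++ "</p>\n" else html
      pvALoop rest (html ++ "  <h2>" ++ line ++ "</h2>\n") []
    else
      pvALoop rest html (para ++ [line])

def create_chapter_html (title : String) (content : List String) : String :=
  let html := "<?xml version=\"1.0\" encoding=\"utf-8\"?>\n"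
  let html := html ++ "<!DOCTYPE html>\n"
  let html := html ++ "<html xmlns=\"http://www.w3.org/1999/xhtml\" xmlns:epub=\"http://www.idpf.org/2007/ops\">\n"
  let html := html ++ "<head>\n"
  let html := html ++ "  <title>" ++ (if title ≠ "" then title else "Chapter") ++ "</title>\n"
  let html := html ++ "  <meta charset=\"utf-8\" />\n"
  let html := html ++ "</head>\n"
  let html := html ++ "<body>\n"
  let html := if title ≠ "" then html ++ "  <h1>" ++ title ++ "</h1>\n" else html
  let st := pvALoop content html []
  let html := if st.2 ≠ [] then st.1 ++ "  <p>" ++ PySem.Str.join " " st.2 ++ "</p>\n" else st.1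
  let html := html ++ "</body>\n"
  html ++ "</html>"

-- ===== PORT B =====
def pvIsHeading (line : String) : Bool :=
  decide (PySem.Str.len line < 20) && !PySem.Str.startswith line " "

-- a non-blank, non-heading line (belongs to the current paragraph run)
def pvIsBody (line : String) : Bool := (line != "") && !pvIsHeading line

-- phase 1: the element list; a paragraph element swallows the whole run of body lines at once
def pvElements : List String → List (String × String)
  | [] => []
  | line :: rest =>
    if line = "" then pvElements rest
    else if pvIsHeading line then ("h2", line) :: pvElements rest
    else
      ("p", PySem.Str.join " " (line :: rest.takeWhile pvIsBody)) ::
        pvElements (rest.dropWhile pvIsBody)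
  termination_by l => l.length
  decreasing_by
    all_goals have := List.length_dropWhile_le pvIsBody rest
    all_goals simp only [List.length_cons]
    all_goals omega

-- phase 2: render one element
def pvRender (e : String × String) : String :=
  "  <" ++ e.1 ++ ">" ++ e.2 ++ "</" ++ e.1 ++ ">\n"

def create_chapter_html_alt (title : String) (content : List String) : String :=
  let parts : List String :=
    ["<?xml version=\"1.0\" encoding=\"utf-8\"?>\n",
     "<!DOCTYPE html>\n",
     "<html xmlns=\"http://www.w3.org/1999/xhtml\" xmlns:epub=\"http://www.idpf.org/2007/ops\">\n",
     "<head>\n",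
     "  <title>" ++ (if title ≠ "" then title else "Chapter") ++ "</title>\n",
     "  <meta charset=\"utf-8\" />\n",
     "</head>\n",
     "<body>\n"]
  let parts := if title ≠ "" then parts ++ ["  <h1>" ++ title ++ "</h1>\n"] else parts
  let parts := parts ++ (pvElements content).map pvRender
  let parts := parts ++ ["</body>\n", "</html>"]
  String.join parts

-- ===== PRECONDITION & SPEC =====
def Spec_create_chapter_html (title : String) (content : List String) (out : String) : Prop := out = create_chapter_html_alt title content
instance (title : String) (content : List String) (out : String) : Decidable (Spec_create_chapter_html title content out) := by unfold Spec_create_chapter_html; infer_instance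

-- ===== CLAIM (what is proved, stated in full; the proofs are below) =====
def Claim_equal_create_chapter_html : Prop := ∀ (title : String) (content : List String), Dom_create_chapter_html title content → Spec_create_chapter_html title content (create_chapter_html title content)

-- ===== LEMMAS AND PROOFS =====

theorem pvFoldl_append (l : List String) : ∀ (s t : String),
    l.foldl (· ++ ·) (s ++ t) = s ++ l.foldl (· ++ ·) t := by
  induction l with
  | nil => intro s t; rfl
  | cons x xs ih => intro s t; simpa [String.append_assoc] using ih s (t ++ x)

theorem pvJoin_cons (s : String) (l : List String) : String.join (s :: l) = s ++ String.join l := by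
  show l.foldl (· ++ ·) ("" ++ s) = s ++ l.foldl (· ++ ·) ""
  rw [show ("" ++ s) = (s ++ "") from by simp, pvFoldl_append]

theorem pvJoin_append (a b : List String) :
    String.join (a ++ b) = String.join a ++ String.join b := by
  induction a with
  | nil => simp [String.join]
  | cons x xs ih => simp [pvJoin_cons, ih, String.append_assoc]

-- flushing a pending paragraph, as an element list
def pvFlushL (para : List String) : List (String × String) :=
  if para = [] then [] else [("p", PySem.Str.join " " para)]

-- A's loop with pending paragraph `para`, expressed as the elements it will still emit
def pvE (para : List String) : List String → List (String × String)
  | [] => pvFlushL para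
  | line :: rest =>
    if line = "" then pvFlushL para ++ pvE [] rest
    else if pvIsHeading line then pvFlushL para ++ ("h2", line) :: pvE [] rest
    else pvE (para ++ [line]) rest

-- the "final flush" that A performs after the loop
def pvFin (st : String × List String) : String :=
  if st.2 ≠ [] then st.1 ++ "  <p>" ++ PySem.Str.join " " st.2 ++ "</p>\n" else st.1

theorem pvALoop_eq (lines : List String) : ∀ (html : String) (para : List String),
    pvFin (pvALoop lines html para) = html ++ String.join ((pvE para lines).map pvRender) := by
  induction lines with
  | nil =>
    intro html para
    by_cases h : para = [] <;>
      simp [pvALoop, pvE, pvFlushL, h, pvRender, pvJoin_cons, String.join, pvFin] <;>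
      apply String.toList_injective <;> simp [String.append_assoc]
  | cons line rest ih =>
    intro html para
    simp only [pvALoop, pvE]
    by_cases hb : line = ""
    · by_cases h : para = [] <;>
        simp only [hb, ite_true, h, ne_eq, not_true_eq_false, ite_false, not_false_eq_true,
          ite_true, if_pos, if_neg, ih, pvFlushL, List.nil_append, List.map_append,
          List.map_cons, List.map_nil, pvJoin_append, pvJoin_cons, pvRender] <;>
        apply String.toList_injective <;>
        simp [String.append_assoc, String.join]
    · by_cases hh : (decide (PySem.Str.len line < 20) && !PySem.Str.startswith line " ") = true
      · have hh' : pvIsHeading line = true := hh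
        by_cases h : para = [] <;>
          simp only [hb, ite_false, if_neg, not_false_eq_true, hh, hh', ite_true, h,
            ne_eq, not_true_eq_false, if_pos, ih, pvFlushL, List.nil_append,
            List.map_append, List.map_cons, List.map_nil, pvJoin_append, pvJoin_cons,
            pvRender] <;>
          apply String.toList_injective <;>
          simp [String.append_assoc, String.join]
      · have hh' : pvIsHeading line = false := by
          simp only [pvIsHeading]; simpa using hh
        simp only [hb, ite_false, if_neg, not_false_eq_true, hh, hh', Bool.false_eq_true, ih]

theorem pvE_run (lines : List String) : ∀ (para : List String), para ≠ [] →
    pvE para lines = ("p", PySem.Str.join " " (para ++ lines.takeWhile pvIsBody)) ::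
      pvE [] (lines.dropWhile pvIsBody) := by
  induction lines with
  | nil => intro para h; simp [pvE, pvFlushL, h]
  | cons line rest ih =>
    intro para h
    by_cases hb : line = ""
    · simp [pvE, hb, pvFlushL, h, pvIsBody, List.takeWhile_cons, List.dropWhile_cons]
    · by_cases hh : pvIsHeading line = true
      · simp [pvE, hb, hh, pvFlushL, h, pvIsBody, List.takeWhile_cons, List.dropWhile_cons]
      · have hbody : pvIsBody line = true := by
          simp only [pvIsBody, Bool.and_eq_true, bne_iff_ne, ne_eq, Bool.not_eq_true']
          exact ⟨hb, by simpa using hh⟩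
        simp only [pvE, hb, ite_false, if_neg, not_false_eq_true, hh, Bool.false_eq_true,
          List.takeWhile_cons, List.dropWhile_cons, hbody, ite_true]
        rw [ih (para ++ [line]) (by simp)]
        simp

theorem pvE_nil_eq (lines : List String) : pvE [] lines = pvElements lines := by
  induction lines using pvElements.induct with
  | case1 => simp [pvE, pvElements, pvFlushL]
  | case2 rest ih => simp [pvE, pvElements, pvFlushL, ih]
  | case3 line rest hb hh ih => simp [pvE, pvElements, hb, hh, pvFlushL, ih]
  | case4 line rest hb hh ih =>
    rw [pvElements]
    simp only [pvE, hb, ite_false, if_neg, not_false_eq_true, hh, Bool.false_eq_true]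
    rw [List.nil_append, pvE_run rest [line] (by simp)]
    simp [hb, hh, ih]

-- ===== VERDICT (by name: the statement is the Claim_ definition above) =====
set_option maxRecDepth 20000 in
theorem create_chapter_html_spec : Claim_equal_create_chapter_html := by
  intro title content _
  unfold Spec_create_chapter_html create_chapter_html create_chapter_html_alt
  simp only []
  change pvFin (pvALoop content _ []) ++ "</body>\n" ++ "</html>" = _
  rw [pvALoop_eq, pvE_nil_eq]
  by_cases ht : title = "" <;>
    simp only [ht, ne_eq, not_true_eq_false, not_false_eq_true, ite_true, ite_false,
      if_pos, if_neg, List.nil_append, List.append_assoc, List.singleton_append,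
      pvJoin_append, pvJoin_cons] <;>
    apply String.toList_injective <;>
    simp [String.append_assoc, String.join]
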